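-- pv_equiv track=rewrite | github.com/Nexynn/MiniClashAI | NN.py | convertir_document_vers_liste
-- ===== SOURCE A (Python) =====
-- def convertir_document_vers_liste(document):
--     lignes = document.strip().split('\n')
--     resultList = []
--     gameList = []
--     liste = []
--     for ligne in lignes:
--         if len(ligne) == 5:
--             liste.append(ligne)
--         else:
--             gameList.append(liste)
--             resultList.append(ligne)
--             liste = []
--     return gameList, resultList
-- ===== SOURCE B (Python) =====
-- def convertir_document_vers_liste(document):
--     # Recursive decomposition: split off one (group, result) pair at a time.
--     def parse(xs):
--         group = []
--         rest = xs
--         while rest and len(rest[0]) == 5: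
--             group = group + [rest[0]]
--             rest = rest[1:]
--         if not rest:
--             return [], []
--         gs, rs = parse(rest[1:])
--         return [group] + gs, [rest[0]] + rs
--     return parse(document.strip().split('\n'))
-- ===== Notes on version B (the rewrite author's own statement) =====
-- stated objective: alternative
-- what changed: A's single accumulate-and-flush fold over all lines with a pending-group buffer is replaced by a recursive decomposition that repeatedly spans the leading run of length-5 lines and splits off one (group, result) pair per delimiter line, naturally dropping trailing length-5 lines.
import Mathlib
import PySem

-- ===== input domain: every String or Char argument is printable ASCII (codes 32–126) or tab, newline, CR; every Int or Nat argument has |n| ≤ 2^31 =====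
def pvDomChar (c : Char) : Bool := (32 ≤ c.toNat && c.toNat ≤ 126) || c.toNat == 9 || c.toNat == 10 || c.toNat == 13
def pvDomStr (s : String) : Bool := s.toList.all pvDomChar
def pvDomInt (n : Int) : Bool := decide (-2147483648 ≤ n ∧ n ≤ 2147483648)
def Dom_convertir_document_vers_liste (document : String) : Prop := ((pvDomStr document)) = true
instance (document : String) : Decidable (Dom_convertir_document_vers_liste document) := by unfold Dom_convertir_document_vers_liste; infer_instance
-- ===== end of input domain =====

-- B replaces A's single accumulate-and-flush fold by a recursive decomposition that splits
-- off one (group, result) pair at a time (objective: alternative decomposition, same cost).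

-- ===== PORT A =====
-- .split('\n') with the non-empty separator "\n" always succeeds: split? is some; getD [] is exact.
def convertir_document_vers_liste (document : String) : List (List String) × List String :=
  let lignes := (PySem.Str.split? (PySem.Str.strip document) "\n").getD []
  let res := lignes.foldl
    (fun (st : List (List String) × List String × List String) ligne =>
      if PySem.Str.len ligne == 5 then
        (st.1, st.2.1, st.2.2 ++ [ligne])
      else
        (st.1 ++ [st.2.2], st.2.1 ++ [ligne], []))
    ([], [], [])
  (res.1, res.2.1)

-- ===== PORT B =====
-- Source B's inner while loop: advance `rest`, accumulating `group`, while the head has length 5.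
def pvSpan5 (group : List String) : List String → List String × List String
  | [] => (group, [])
  | x :: tl => if PySem.Str.len x == 5 then pvSpan5 (group ++ [x]) tl else (group, x :: tl)

-- termination measure for pvParse (cited in its decreasing_by)
theorem pvSpan5_snd_length (group : List String) (xs : List String) :
    (pvSpan5 group xs).2.length ≤ xs.length := by
  induction xs generalizing group with
  | nil => simp [pvSpan5]
  | cons x tl ih =>
    simp only [pvSpan5]
    split
    · exact Nat.le_trans (ih _) (Nat.le_succ _)
    · simp

-- Source B's recursive `parse`
def pvParse (xs : List String) : List (List String) × List String :=
  match h : pvSpan5 [] xs with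
  | (_, []) => ([], [])
  | (group, d :: tl) =>
    let p := pvParse tl
    (group :: p.1, d :: p.2)
termination_by xs.length
decreasing_by
  have hl := pvSpan5_snd_length [] xs
  rw [h] at hl
  simp at hl
  omega

def convertir_document_vers_liste_alt (document : String) : List (List String) × List String :=
  pvParse ((PySem.Str.split? (PySem.Str.strip document) "\n").getD [])

-- ===== PRECONDITION & SPEC =====
def Spec_convertir_document_vers_liste (document : String) (out : List (List String) × List String) : Prop := out = convertir_document_vers_liste_alt document
instance (document : String) (out : List (List String) × List String) : Decidable (Spec_convertir_document_vers_liste document out) := by unfold Spec_convertir_document_vers_liste; infer_instance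

-- ===== CLAIM (what is proved, stated in full; the proofs are below) =====
def Claim_equal_convertir_document_vers_liste : Prop := ∀ (document : String), Dom_convertir_document_vers_liste document → Spec_convertir_document_vers_liste document (convertir_document_vers_liste document)

-- ===== LEMMAS AND PROOFS =====

-- prepend `cur` onto the first group, if any
def pvPrep (cur : List String) : List (List String) → List (List String)
  | [] => []
  | g :: gs => (cur ++ g) :: gs

theorem pvPrep_nil (gs : List (List String)) : pvPrep [] gs = gs := by
  cases gs <;> simp [pvPrep]

theorem pvPrep_prep (cur x : List String) (gs : List (List String)) :
    pvPrep cur (pvPrep x gs) = pvPrep (cur ++ x) gs := by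
  cases gs <;> simp [pvPrep]

theorem pvSpan5_eq (group : List String) (xs : List String) :
    pvSpan5 group xs =
      (group ++ xs.takeWhile (fun s => PySem.Str.len s == 5),
       xs.dropWhile (fun s => PySem.Str.len s == 5)) := by
  induction xs generalizing group with
  | nil => simp [pvSpan5]
  | cons x tl ih =>
    simp only [pvSpan5, List.takeWhile, List.dropWhile]
    cases h : (PySem.Str.len x == 5) with
    | true => simp only [ih]; simp
    | false => simp

theorem pvParse_nil : pvParse [] = ([], []) := by
  have hs : pvSpan5 [] ([] : List String) = ([], []) := rfl
  rw [pvParse, hs]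

theorem pvParse_cons_neg (x : String) (tl : List String)
    (h : (PySem.Str.len x == 5) = false) :
    pvParse (x :: tl) = ([] :: (pvParse tl).1, x :: (pvParse tl).2) := by
  have hs : pvSpan5 [] (x :: tl) = ([], x :: tl) := by
    simp only [pvSpan5, h]; rfl
  rw [pvParse, hs]

theorem pvParse_cons_pos (x : String) (tl : List String)
    (h : (PySem.Str.len x == 5) = true) :
    pvParse (x :: tl) = (pvPrep [x] (pvParse tl).1, (pvParse tl).2) := by
  have hx : pvSpan5 [] (x :: tl) =
      (x :: tl.takeWhile (fun s => PySem.Str.len s == 5),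
       tl.dropWhile (fun s => PySem.Str.len s == 5)) := by
    rw [pvSpan5_eq]
    simp only [List.takeWhile, List.dropWhile, h]
    rfl
  have htl : pvSpan5 [] tl =
      (tl.takeWhile (fun s => PySem.Str.len s == 5),
       tl.dropWhile (fun s => PySem.Str.len s == 5)) := by
    rw [pvSpan5_eq]; rfl
  rw [pvParse, hx]
  conv_rhs => rw [pvParse, htl]
  cases hd : tl.dropWhile (fun s => PySem.Str.len s == 5) with
  | nil => simp [pvPrep]
  | cons d tl' => simp [pvPrep]

theorem pvFold_eq (xs : List String) (g : List (List String)) (r cur : List String) :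
    (((xs.foldl
        (fun (st : List (List String) × List String × List String) ligne =>
          if PySem.Str.len ligne == 5 then
            (st.1, st.2.1, st.2.2 ++ [ligne])
          else
            (st.1 ++ [st.2.2], st.2.1 ++ [ligne], []))
        (g, r, cur)).1,
      (xs.foldl
        (fun (st : List (List String) × List String × List String) ligne =>
          if PySem.Str.len ligne == 5 then
            (st.1, st.2.1, st.2.2 ++ [ligne])
          else
            (st.1 ++ [st.2.2], st.2.1 ++ [ligne], []))
        (g, r, cur)).2.1) : List (List String) × List String) =
      (g ++ pvPrep cur (pvParse xs).1, r ++ (pvParse xs).2) := by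
  induction xs generalizing g r cur with
  | nil => simp [pvParse_nil, pvPrep]
  | cons x tl ih =>
    simp only [List.foldl_cons]
    cases h : (PySem.Str.len x == 5) with
    | true =>
      rw [if_pos (by simp_all)]
      rw [ih, pvParse_cons_pos x tl h, pvPrep_prep]
    | false =>
      rw [if_neg (by simp_all)]
      rw [ih, pvParse_cons_neg x tl h]
      cases hgs : (pvParse tl).1 <;> simp [pvPrep]

theorem convertir_document_vers_liste_eq (document : String) :
    convertir_document_vers_liste document = convertir_document_vers_liste_alt document := by
  unfold convertir_document_vers_liste convertir_document_vers_liste_alt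
  rw [pvFold_eq]
  simp [pvPrep_nil]

-- ===== VERDICT (by name: the statement is the Claim_ definition above) =====
theorem convertir_document_vers_liste_spec : Claim_equal_convertir_document_vers_liste := by
  intro document _
  show convertir_document_vers_liste document = convertir_document_vers_liste_alt document
  exact convertir_document_vers_liste_eq document
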